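-- pv_equiv track=rewrite | github.com/K53/atcoder-workspace | abc232/D/main.py | bfs
-- ===== SOURCE A (Python) =====
-- from collections import deque
--
-- INF = 10 ** 16
--
-- def bfs(G, H, W, startY, startX) -> list:
--     # ゴールやスタートを任意に設定できる問題では開始点が壁であるケースに注意!!!!
--     q = deque()
--     dist = [[INF] * W for _ in range(H)]
--     q.append((startY, startX))
--     dist[startY][startX] = 0
--     while q:
--         nowy, nowx = q.popleft()
--         for dx, dy in [(0, 1), (1, 0)]:
--             nexty = nowy + dy
--             nextx = nowx + dx
--             if nexty < 0 or nextx < 0 or nexty >= H or nextx >= W or dist[nexty][nextx] != INF or G[nexty][nextx] == "#":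
--                 continue
--             q.append((nexty, nextx))
--             dist[nexty][nextx] = dist[nowy][nowx] + 1
--     return dist
-- ===== SOURCE B (Python) =====
-- INF = 10 ** 16
--
-- def bfs(G, H, W, startY, startX) -> list:
--     # One row-major DP pass instead of a BFS queue: with only right/down moves,
--     # a cell's distance is one more than the nearer of its up and left neighbours.
--     # Distances live in a dict keyed by cell, seeded at the start cell; at the
--     # end they are scattered into the H x W grid of INF.
--     dmap = {(startY, startX): 0}
--     for i in range(H):
--         for j in range(W):
--             if (i, j) in dmap:
--                 continue
--             cand = [dmap[p] for p in ((i - 1, j), (i, j - 1)) if p in dmap]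
--             if cand and G[i][j] != "#":
--                 dmap[(i, j)] = min(cand) + 1
--     dist = [[INF] * W for _ in range(H)]
--     for (y, x), v in dmap.items():
--         dist[y][x] = v
--     return dist
-- ===== Notes on version B (the rewrite author's own statement) =====
-- stated objective: alternative
-- what changed: Replaces the BFS deque with a single row-major dynamic-programming pass: distances live in a dict keyed by cell, each cell getting one more than the nearer of its up and left neighbours, and are scattered into the H x W grid at the end; no queue and no visited bookkeeping. Pre_ excludes starts outside Python's index range (A raises IndexError), nonnegative starts over grids that do not cover the H x W window (a sufficient no-IndexError condition; …
-- outside the precondition, e.g. on bfs(['.'], 1, 1, -1, 0): A returns [[0]], B returns [[1]]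
import Mathlib
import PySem

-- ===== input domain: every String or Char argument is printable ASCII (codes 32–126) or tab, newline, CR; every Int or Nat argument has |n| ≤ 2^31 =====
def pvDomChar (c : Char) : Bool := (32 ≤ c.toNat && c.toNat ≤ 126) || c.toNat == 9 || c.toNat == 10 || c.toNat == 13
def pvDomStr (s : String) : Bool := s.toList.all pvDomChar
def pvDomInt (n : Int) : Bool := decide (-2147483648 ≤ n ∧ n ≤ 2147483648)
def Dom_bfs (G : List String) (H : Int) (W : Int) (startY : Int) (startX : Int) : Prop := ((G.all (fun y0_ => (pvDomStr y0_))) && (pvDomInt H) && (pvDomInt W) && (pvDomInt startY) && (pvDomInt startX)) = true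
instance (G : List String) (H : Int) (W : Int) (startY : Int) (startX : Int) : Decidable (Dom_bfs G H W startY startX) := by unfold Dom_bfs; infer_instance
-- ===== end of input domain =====

-- B replaces A's BFS deque with one row-major DP pass over a dict of distances keyed by cell; no queue.
-- ===== PORT A =====
def pvINF : Int := 10 ^ 16

-- G[y][x] as a Char; the default is never used on Pre_ inputs (Python would raise there)
def pvChAt (G : List String) (y x : Int) : Char :=
  ((PySem.List.pyGet? G y).bind (fun s => PySem.Str.pyGet? s x)).getD '#'

-- dist[y][x] (Python negative-index semantics via pyGet?); default never used on Pre_ inputs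
def pvGet2 (d : List (List Int)) (y x : Int) : Int :=
  ((PySem.List.pyGet? d y).bind (fun r => PySem.List.pyGet? r x)).getD pvINF

-- dist[y][x] = v (Python negative-index semantics); in range on Pre_ inputs
def pvSet2 (d : List (List Int)) (y x : Int) (v : Int) : List (List Int) :=
  let yi := (if y < 0 then y + (d.length : Int) else y).toNat
  match d[yi]? with
  | some row =>
      let xi := (if x < 0 then x + (row.length : Int) else x).toNat
      d.set yi (row.set xi v)
  | none => d

-- one iteration of A's 'for dx, dy in [(0, 1), (1, 0)]' body
def pvStep (G : List String) (H W nowy nowx : Int)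
    (st : List (Int × Int) × List (List Int)) (dxy : Int × Int) :
    List (Int × Int) × List (List Int) :=
  let nexty := nowy + dxy.2
  let nextx := nowx + dxy.1
  if nexty < 0 ∨ nextx < 0 ∨ H ≤ nexty ∨ W ≤ nextx ∨ pvGet2 st.2 nexty nextx ≠ pvINF ∨ pvChAt G nexty nextx = '#'
  then st
  else (st.1 ++ [(nexty, nextx)], pvSet2 st.2 nexty nextx (pvGet2 st.2 nowy nowx + 1))

-- A's 'while q' loop; fuel only makes it total (3*cells+2 strictly bounds the loop's decreasing measure)
def pvLoopA (G : List String) (H W : Int) : Nat → List (Int × Int) → List (List Int) → List (List Int)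
  | 0, _, dist => dist
  | _ + 1, [], dist => dist
  | fuel + 1, (nowy, nowx) :: rest, dist =>
      let st := [((0 : Int), (1 : Int)), ((1 : Int), (0 : Int))].foldl (pvStep G H W nowy nowx) ([], dist)
      pvLoopA G H W fuel (rest ++ st.1) st.2

def bfs (G : List String) (H : Int) (W : Int) (startY : Int) (startX : Int) : List (List Int) :=
  let dist0 := List.replicate H.toNat (List.replicate W.toNat pvINF)
  let dist1 := pvSet2 dist0 startY startX 0
  pvLoopA G H W (3 * (H.toNat * W.toNat) + 2) [(startY, startX)] dist1

-- ===== PORT B =====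
def bfs_alt (G : List String) (H : Int) (W : Int) (startY : Int) (startX : Int) : List (List Int) :=
  let dm0 : PySem.Dict (Int × Int) Int := PySem.Dict.ofList [((startY, startX), (0 : Int))]
  let dm := (PySem.List.pyRange 0 H 1).foldl (fun dm i =>
    (PySem.List.pyRange 0 W 1).foldl (fun dm j =>
      if dm.contains (i, j) then dm
      else
        let cand := [(i - 1, j), (i, j - 1)].filterMap (fun p => dm.get? p)
        match PySem.List.min? cand (fun v => v) with
        | none => dm
        | some m => if pvChAt G i j = '#' then dm else dm.insert (i, j) (m + 1)) dm) dm0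
  dm.items.foldl (fun dist kv => pvSet2 dist kv.1.1 kv.1.2 kv.2)
    (List.replicate H.toNat (List.replicate W.toNat pvINF))

-- ===== PRECONDITION & SPEC =====
-- len(G[i]) (0 when row i does not exist); used by Pre_'s coverage condition
def pvRowLen (G : List String) (i : Int) : Int :=
  ((PySem.List.pyGet? G i).map PySem.Str.len).getD 0

-- Pre_ excludes (a) starts outside Python's index range of the H×W grid, on which A raises
-- IndexError, (b) in-range nonnegative starts over grids that do not cover the full H×W window,
-- where either program can raise IndexError reading a missing cell, and (c) starts with exactly
-- one coordinate equal to -1 (the other nonnegative), an out-of-contract corner where both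
-- programs grow distances from a negatively-indexed seed and their values legitimately disagree.
def Pre_bfs (G : List String) (H : Int) (W : Int) (startY : Int) (startX : Int) : Prop :=
  -H ≤ startY ∧ startY < H ∧ -W ≤ startX ∧ startX < W ∧
  ((0 ≤ startY ∧ 0 ≤ startX ∧ H ≤ (G.length : Int) ∧ ∀ i : Nat, i < H.toNat → W ≤ pvRowLen G ↑i)
    ∨ startY ≤ -2 ∨ startX ≤ -2 ∨ (startY = -1 ∧ startX = -1))
instance (G : List String) (H : Int) (W : Int) (startY : Int) (startX : Int) : Decidable (Pre_bfs G H W startY startX) := by unfold Pre_bfs; infer_instance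
def pvWitness_bfs : List String × Int × Int × Int × Int := (["."], 1, 1, 0, 0)

def Spec_bfs (G : List String) (H : Int) (W : Int) (startY : Int) (startX : Int) (out : List (List Int)) : Prop := out = bfs_alt G H W startY startX
instance (G : List String) (H : Int) (W : Int) (startY : Int) (startX : Int) (out : List (List Int)) : Decidable (Spec_bfs G H W startY startX out) := by unfold Spec_bfs; infer_instance

-- ===== CLAIM (what is proved, stated in full; the proofs are below) =====
def Claim_equal_bfs : Prop := ∀ (G : List String) (H : Int) (W : Int) (startY : Int) (startX : Int), Dom_bfs G H W startY startX → Pre_bfs G H W startY startX → Spec_bfs G H W startY startX (bfs G H W startY startX)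

-- ===== LEMMAS AND PROOFS =====

-- ======== spec machinery ========
def pvWall (G : List String) (i j : Nat) : Bool := pvChAt G i j == '#'

def pvOff (sy sx i j : Nat) : Int := (i : Int) + j - sy - sx

def pvReach (wall : Nat → Nat → Bool) (sy sx : Nat) : Nat → Nat → Bool
  | i, j =>
    if i = sy ∧ j = sx then true
    else if wall i j then false
    else ((if _h : 0 < i then pvReach wall sy sx (i - 1) j else false)
      || (if _h : 0 < j then pvReach wall sy sx i (j - 1) else false))
  termination_by i j => i + j
  decreasing_by all_goals omega

def pvSpecV (wall : Nat → Nat → Bool) (sy sx i j : Nat) : Int :=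
  if pvReach wall sy sx i j then pvOff sy sx i j else pvINF

lemma pvOff_self (sy sx : Nat) : pvOff sy sx sy sx = 0 := by unfold pvOff; omega

lemma pvReach_start (wall : Nat → Nat → Bool) (sy sx : Nat) : pvReach wall sy sx sy sx = true := by
  rw [pvReach]; simp

lemma pvReach_of_wall (wall : Nat → Nat → Bool) (sy sx i j : Nat) (hns : ¬(i = sy ∧ j = sx))
    (hw : wall i j = true) : pvReach wall sy sx i j = false := by
  rw [pvReach]; simp [hns, hw]

lemma pvReach_step (wall : Nat → Nat → Bool) (sy sx i j : Nat) (hns : ¬(i = sy ∧ j = sx))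
    (hw : wall i j = false) :
    pvReach wall sy sx i j
      = ((decide (0 < i) && pvReach wall sy sx (i - 1) j)
        || (decide (0 < j) && pvReach wall sy sx i (j - 1))) := by
  rw [pvReach]
  by_cases h1 : 0 < i <;> by_cases h2 : 0 < j <;> simp [hns, hw, h1, h2]

lemma pvReach_succ (G : List String) (sy sx yi xi ni nj : Nat)
    (hnb : (ni = yi + 1 ∧ nj = xi) ∨ (ni = yi ∧ nj = xi + 1))
    (hw : pvWall G ni nj = false)
    (hr : pvReach (pvWall G) sy sx yi xi = true) :
    pvReach (pvWall G) sy sx ni nj = true := by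
  by_cases hs : ni = sy ∧ nj = sx
  · obtain ⟨h1, h2⟩ := hs; subst h1; subst h2; exact pvReach_start _ _ _
  · rw [pvReach_step _ _ _ _ _ hs hw]
    rcases hnb with ⟨h1, h2⟩ | ⟨h1, h2⟩
    · subst h1; subst h2; simp [hr]
    · subst h1; subst h2; simp [hr]

-- ======== nested-list access lemmas ========
lemma pvGet2_nat (d : List (List Int)) (y x : Nat) :
    pvGet2 d ↑y ↑x = ((d[y]?).bind (fun r => r[x]?)).getD pvINF := by
  simp [pvGet2]

lemma pvGet2_replicate (h w : Nat) (y x : Nat) :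
    pvGet2 (List.replicate h (List.replicate w pvINF)) ↑y ↑x = pvINF := by
  rw [pvGet2_nat]
  by_cases hy : y < h
  · simp [List.getElem?_replicate, hy]
    by_cases hx : x < w <;> simp [hx]
  · simp [List.getElem?_replicate, hy]

lemma pvSet2_shape (h w : Nat) (d : List (List Int)) (hlen : d.length = h)
    (hrow : ∀ r ∈ d, r.length = w) (y x : Int) (v : Int) :
    (pvSet2 d y x v).length = h ∧ ∀ r ∈ pvSet2 d y x v, r.length = w := by
  unfold pvSet2
  dsimp only
  split
  next row hg =>
    constructor
    · simpa using hlen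
    · intro r hr
      rcases List.mem_or_eq_of_mem_set hr with h1 | h1
      · exact hrow r h1
      · have hm : row ∈ d := List.mem_of_getElem? hg
        have := hrow row hm
        simp [h1, this]
  next => exact ⟨hlen, hrow⟩

lemma pvGet2_pvSet2 (h w : Nat) (d : List (List Int)) (hlen : d.length = h)
    (hrow : ∀ r ∈ d, r.length = w) (a b : Int) (a' b' : Nat) (ha' : a' < h) (hb' : b' < w)
    (hA : (if a < 0 then a + (h : Int) else a) = ↑a') (hB : (if b < 0 then b + (w : Int) else b) = ↑b')
    (v : Int) (y x : Nat) :
    pvGet2 (pvSet2 d a b v) ↑y ↑x = if y = a' ∧ x = b' then v else pvGet2 d ↑y ↑x := by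
  have hal : a' < d.length := by omega
  have hg : d[a']? = some (d[a']'hal) := List.getElem?_eq_getElem hal
  have hrl : (d[a']'hal).length = w := hrow _ (List.getElem_mem hal)
  have hbl : b' < (d[a']'hal).length := by omega
  unfold pvSet2
  dsimp only
  rw [show (if a < 0 then a + (d.length : Int) else a).toNat = a' by rw [hlen, hA]; simp]
  rw [hg]
  dsimp only
  rw [show (if b < 0 then b + ((d[a']'hal).length : Int) else b).toNat = b' by rw [hrl, hB]; simp]
  rw [pvGet2_nat, pvGet2_nat, List.getElem?_set]
  by_cases hy : a' = y
  · subst hy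
    rw [if_pos rfl, if_pos hal]
    simp only [Option.bind_some]
    rw [List.getElem?_set]
    by_cases hx : b' = x
    · subst hx
      rw [if_pos rfl, if_pos hbl]
      simp
    · rw [if_neg hx]
      have hcon : ¬(x = b') := fun hcc => hx hcc.symm
      simp [hg, hcon]
  · rw [if_neg hy]
    have hcon : ¬(y = a' ∧ x = b') := fun hcon => hy hcon.1.symm
    simp [hcon]

-- ======== counting pvINF entries (termination measure) ========
def pvCnt (d : List (List Int)) : Nat := (d.map (fun r => r.countP (fun v => v == pvINF))).sum

lemma countP_set {α : Type} (p : α → Bool) (l : List α) (k : Nat) (v cur : α)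
    (hc : l[k]? = some cur) :
    (l.set k v).countP p + (if p cur then 1 else 0) = l.countP p + (if p v then 1 else 0) := by
  induction l generalizing k with
  | nil => simp at hc
  | cons a t ih =>
    cases k with
    | zero =>
      simp at hc
      subst hc
      simp [List.countP_cons]
      omega
    | succ k =>
      have hc' : t[k]? = some cur := by simpa using hc
      have ih' := ih k hc'
      simp only [List.set_cons_succ, List.countP_cons]
      omega

lemma sum_map_set {α : Type} (f : α → Nat) (l : List α) (k : Nat) (v cur : α)
    (hc : l[k]? = some cur) :
    ((l.set k v).map f).sum + f cur = (l.map f).sum + f v := by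
  induction l generalizing k with
  | nil => simp at hc
  | cons a t ih =>
    cases k with
    | zero =>
      simp at hc
      subst hc
      simp
      omega
    | succ k =>
      have hc' : t[k]? = some cur := by simpa using hc
      have ih' := ih k hc'
      simp only [List.set_cons_succ, List.map_cons, List.sum_cons]
      omega

lemma pvCnt_pvSet2 (h w : Nat) (d : List (List Int)) (hlen : d.length = h)
    (hrow : ∀ r ∈ d, r.length = w) (a' b' : Nat) (ha' : a' < h) (hb' : b' < w)
    (hInf : pvGet2 d ↑a' ↑b' = pvINF) (v : Int) (hv : v ≠ pvINF) :
    pvCnt (pvSet2 d ↑a' ↑b' v) + 1 = pvCnt d := by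
  have hal : a' < d.length := by omega
  have hg : d[a']? = some (d[a']'hal) := List.getElem?_eq_getElem hal
  have hrl : (d[a']'hal).length = w := hrow _ (List.getElem_mem hal)
  have hbl : b' < (d[a']'hal).length := by omega
  have hgb : (d[a']'hal)[b']? = some ((d[a']'hal)[b']'hbl) := List.getElem?_eq_getElem hbl
  have hval : (d[a']'hal)[b']'hbl = pvINF := by
    rw [pvGet2_nat, hg] at hInf
    simpa [hgb] using hInf
  unfold pvSet2
  dsimp only
  rw [show (if (a' : Int) < 0 then (a' : Int) + (d.length : Int) else (a' : Int)).toNat = a' by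
    rw [if_neg (by omega : ¬((a' : Int) < 0))]; simp]
  rw [hg]
  dsimp only
  rw [show (if (b' : Int) < 0 then (b' : Int) + ((d[a']'hal).length : Int) else (b' : Int)).toNat = b' by
    rw [if_neg (by omega : ¬((b' : Int) < 0))]; simp]
  have h1 := sum_map_set (fun r => r.countP (fun u => u == pvINF)) d a'
      ((d[a']'hal).set b' v) (d[a']'hal) hg
  have h2 := countP_set (fun u => u == pvINF) (d[a']'hal) b' v ((d[a']'hal)[b']'hbl) hgb
  rw [hval] at h2
  simp [hv] at h2
  unfold pvCnt
  simp only [beq_iff_eq] at h1 h2 ⊢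
  omega

lemma pvCnt_le (h w : Nat) (d : List (List Int)) (hlen : d.length = h)
    (hrow : ∀ r ∈ d, r.length = w) : pvCnt d ≤ h * w := by
  induction d generalizing h with
  | nil => simp [pvCnt]
  | cons r t ih =>
    have h1 : r.countP (fun v => v == pvINF) ≤ w := by
      have := List.countP_le_length (l := r) (p := fun v => v == pvINF)
      have hr := hrow r (by simp)
      omega
    have h2 : pvCnt t ≤ t.length * w := ih t.length rfl (fun s hs => hrow s (by simp [hs]))
    have hh : h = t.length + 1 := by simp at hlen; omega
    subst hh
    unfold pvCnt at *
    simp only [List.map_cons, List.sum_cons, Nat.succ_mul]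
    omega

-- ======== the BFS invariant ========
def pvShape (h w : Nat) (d : List (List Int)) : Prop := d.length = h ∧ ∀ r ∈ d, r.length = w

def pvExp (G : List String) (h w : Nat) (d : List (List Int)) (i j : Nat) : Prop :=
  (i + 1 < h → (pvWall G (i + 1) j = true ∨ pvGet2 d ↑(i + 1) ↑j ≠ pvINF)) ∧
  (j + 1 < w → (pvWall G i (j + 1) = true ∨ pvGet2 d ↑i ↑(j + 1) ≠ pvINF))

def pvInv (G : List String) (h w sy sx : Nat) (q : List (Int × Int)) (d : List (List Int)) : Prop :=
  pvShape h w d ∧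
  (∀ p ∈ q, ∃ i j : Nat, p = ((i : Int), (j : Int)) ∧ i < h ∧ j < w ∧
      pvGet2 d ↑i ↑j = pvOff sy sx i j) ∧
  (∀ i, i < h → ∀ j, j < w →
      pvGet2 d ↑i ↑j = pvINF ∨
      (pvGet2 d ↑i ↑j = pvOff sy sx i j ∧ pvReach (pvWall G) sy sx i j = true)) ∧
  pvGet2 d ↑sy ↑sx = 0 ∧
  (∀ i, i < h → ∀ j, j < w → pvGet2 d ↑i ↑j ≠ pvINF →
      ((i : Int), (j : Int)) ∈ q ∨ pvExp G h w d i j)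

lemma pvOff_lt (sy sx i j h w : Nat) (hi : i < h) (hj : j < w) (hb : (h : Int) + w < pvINF) :
    pvOff sy sx i j < pvINF := by
  unfold pvOff
  omega

lemma pvExp_mono (G : List String) (h w : Nat) (d d' : List (List Int)) (i j : Nat)
    (hmono : ∀ y x : Nat, pvGet2 d ↑y ↑x ≠ pvINF → pvGet2 d' ↑y ↑x ≠ pvINF) :
    pvExp G h w d i j → pvExp G h w d' i j := by
  rintro ⟨h1, h2⟩
  exact ⟨fun hh => (h1 hh).imp id (hmono _ _), fun hh => (h2 hh).imp id (hmono _ _)⟩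

-- one iteration of the inner for-loop, characterised: either the guard fires and nothing
-- changes, or the neighbour is fresh and it is pushed and written
lemma pvStep_char (G : List String) (h w sy sx yi xi : Nat)
    (hyi : yi < h) (hxi : xi < w)
    (d : List (List Int)) (hshape : pvShape h w d)
    (hval : pvGet2 d ↑yi ↑xi = pvOff sy sx yi xi)
    (qacc : List (Int × Int)) (ni nj : Nat) (dxy : Int × Int)
    (hd : (dxy = ((0 : Int), (1 : Int)) ∧ ni = yi + 1 ∧ nj = xi) ∨
          (dxy = ((1 : Int), (0 : Int)) ∧ ni = yi ∧ nj = xi + 1)) :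
    (¬(ni < h ∧ nj < w ∧ pvGet2 d ↑ni ↑nj = pvINF ∧ pvWall G ni nj = false) ∧
      pvStep G ↑h ↑w ↑yi ↑xi (qacc, d) dxy = (qacc, d)) ∨
    ((ni < h ∧ nj < w ∧ pvGet2 d ↑ni ↑nj = pvINF ∧ pvWall G ni nj = false) ∧
      pvStep G ↑h ↑w ↑yi ↑xi (qacc, d) dxy
        = (qacc ++ [((ni : Int), (nj : Int))], pvSet2 d ↑ni ↑nj (pvOff sy sx yi xi + 1))) := by
  have hyE : (↑yi + dxy.2 : Int) = ↑ni := by rcases hd with ⟨he, h1, h2⟩ | ⟨he, h1, h2⟩ <;> subst he <;> push_cast <;> omega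
  have hxE : (↑xi + dxy.1 : Int) = ↑nj := by rcases hd with ⟨he, h1, h2⟩ | ⟨he, h1, h2⟩ <;> subst he <;> push_cast <;> omega
  by_cases hP : ni < h ∧ nj < w ∧ pvGet2 d ↑ni ↑nj = pvINF ∧ pvWall G ni nj = false
  · right
    refine ⟨hP, ?_⟩
    unfold pvStep
    dsimp only
    rw [hyE, hxE]
    rw [if_neg ?_, hval]
    · intro hC
      rcases hC with hc | hc | hc | hc | hc | hc
      · omega
      · omega
      · have : ni < h := hP.1; omega
      · have : nj < w := hP.2.1; omega
      · exact hc hP.2.2.1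
      · have := hP.2.2.2
        simp only [pvWall, beq_eq_false_iff_ne, ne_eq] at this
        exact this hc
  · left
    refine ⟨hP, ?_⟩
    unfold pvStep
    dsimp only
    rw [hyE, hxE]
    rw [if_pos ?_]
    by_cases h1 : ni < h
    · by_cases h2 : nj < w
      · by_cases h3 : pvGet2 d ↑ni ↑nj = pvINF
        · have h4 : pvWall G ni nj = true := by
            rcases Bool.eq_false_or_eq_true (pvWall G ni nj) with hc | hc
            · exact hc
            · exact absurd ⟨h1, h2, h3, hc⟩ hP
          right; right; right; right; right
          simpa [pvWall] using h4
        · right; right; right; right; left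
          exact h3
      · right; right; right; left
        omega
    · right; right; left
      omega

-- facts after writing one fresh neighbour cell
lemma pvWrite_facts (G : List String) (h w sy sx : Nat) (hb : (h : Int) + w < pvINF)
    (d : List (List Int)) (hshape : pvShape h w d)
    (hD : ∀ i, i < h → ∀ j, j < w →
      pvGet2 d ↑i ↑j = pvINF ∨
      (pvGet2 d ↑i ↑j = pvOff sy sx i j ∧ pvReach (pvWall G) sy sx i j = true))
    (hS : pvGet2 d ↑sy ↑sx = 0)
    (yi xi ni nj : Nat) (hyi : yi < h) (hxi : xi < w) (hni : ni < h) (hnj : nj < w)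
    (hINF : pvGet2 d ↑ni ↑nj = pvINF) (hwall : pvWall G ni nj = false)
    (hnb : (ni = yi + 1 ∧ nj = xi) ∨ (ni = yi ∧ nj = xi + 1))
    (hval : pvGet2 d ↑yi ↑xi = pvOff sy sx yi xi) :
    pvShape h w (pvSet2 d ↑ni ↑nj (pvOff sy sx yi xi + 1)) ∧
    (∀ y x : Nat, pvGet2 (pvSet2 d ↑ni ↑nj (pvOff sy sx yi xi + 1)) ↑y ↑x
        = if y = ni ∧ x = nj then pvOff sy sx ni nj else pvGet2 d ↑y ↑x) ∧
    (∀ i, i < h → ∀ j, j < w →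
      pvGet2 (pvSet2 d ↑ni ↑nj (pvOff sy sx yi xi + 1)) ↑i ↑j = pvINF ∨
      (pvGet2 (pvSet2 d ↑ni ↑nj (pvOff sy sx yi xi + 1)) ↑i ↑j = pvOff sy sx i j ∧
        pvReach (pvWall G) sy sx i j = true)) ∧
    pvGet2 (pvSet2 d ↑ni ↑nj (pvOff sy sx yi xi + 1)) ↑sy ↑sx = 0 ∧
    pvCnt (pvSet2 d ↑ni ↑nj (pvOff sy sx yi xi + 1)) + 1 = pvCnt d ∧
    pvReach (pvWall G) sy sx ni nj = true := by
  obtain ⟨hlen, hrow⟩ := hshape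
  have hoffe : pvOff sy sx yi xi + 1 = pvOff sy sx ni nj := by
    unfold pvOff; rcases hnb with ⟨h1, h2⟩ | ⟨h1, h2⟩ <;> subst h1 <;> subst h2 <;> push_cast <;> ring
  have hoffn_lt := pvOff_lt sy sx ni nj h w hni hnj hb
  have hoffy_lt := pvOff_lt sy sx yi xi h w hyi hxi hb
  have hreach_now : pvReach (pvWall G) sy sx yi xi = true := by
    rcases hD yi hyi xi hxi with hc | hc
    · rw [hval] at hc; omega
    · exact hc.2
  have hreach_n : pvReach (pvWall G) sy sx ni nj = true :=
    pvReach_succ G sy sx yi xi ni nj hnb hwall hreach_now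
  have hchar : ∀ y x : Nat, pvGet2 (pvSet2 d ↑ni ↑nj (pvOff sy sx yi xi + 1)) ↑y ↑x
      = if y = ni ∧ x = nj then pvOff sy sx ni nj else pvGet2 d ↑y ↑x := by
    intro y x
    rw [hoffe]
    exact pvGet2_pvSet2 h w d hlen hrow ↑ni ↑nj ni nj hni hnj
      (by rw [if_neg (by omega : ¬((ni : Int) < 0))])
      (by rw [if_neg (by omega : ¬((nj : Int) < 0))]) _ y x
  refine ⟨pvSet2_shape h w d hlen hrow _ _ _, hchar, ?_, ?_, ?_, hreach_n⟩
  · intro i hi j hj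
    rw [hchar]
    by_cases hc : i = ni ∧ j = nj
    · rw [if_pos hc, hc.1, hc.2]
      exact Or.inr ⟨rfl, hreach_n⟩
    · rw [if_neg hc]
      exact hD i hi j hj
  · rw [hchar]
    rw [if_neg ?_]
    · exact hS
    · rintro ⟨rfl, rfl⟩
      rw [hS] at hINF
      norm_num [pvINF] at hINF
  · exact pvCnt_pvSet2 h w d hlen hrow ni nj hni hnj hINF _ (by omega)

lemma pvInv_done (G : List String) (h w sy sx : Nat) (hsy : sy < h) (hsx : sx < w)
    (d : List (List Int)) (hInv : pvInv G h w sy sx [] d) :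
    ∀ i, i < h → ∀ j, j < w → pvGet2 d ↑i ↑j = pvSpecV (pvWall G) sy sx i j := by
  obtain ⟨hshape, hQ, hD, hS, hX⟩ := hInv
  have hINF0 : (0 : Int) ≠ pvINF := by norm_num [pvINF]
  have key : ∀ s : Nat, ∀ i, i < h → ∀ j, j < w → i + j ≤ s →
      pvReach (pvWall G) sy sx i j = true → pvGet2 d ↑i ↑j ≠ pvINF := by
    intro s
    induction s with
    | zero =>
      intro i hi j hj hs hr
      have hi0 : i = 0 := by omega
      have hj0 : j = 0 := by omega
      subst hi0; subst hj0
      by_cases hst : 0 = sy ∧ 0 = sx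
      · rw [← hst.1, ← hst.2] at hS
        rw [hS]; exact hINF0
      · exfalso
        by_cases hwl : pvWall G 0 0 = true
        · rw [pvReach_of_wall _ _ _ _ _ hst hwl] at hr; exact Bool.false_ne_true hr
        · rw [pvReach_step _ _ _ _ _ hst (by simpa using hwl)] at hr
          simp at hr
    | succ s ih =>
      intro i hi j hj hs hr
      by_cases hst : i = sy ∧ j = sx
      · rw [hst.1, hst.2, hS]; exact hINF0
      · have hwl : pvWall G i j = false := by
          by_cases hwl : pvWall G i j = true
          · rw [pvReach_of_wall _ _ _ _ _ hst hwl] at hr; exact absurd hr Bool.false_ne_true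
          · simpa using hwl
        rw [pvReach_step _ _ _ _ _ hst hwl] at hr
        simp only [Bool.or_eq_true, Bool.and_eq_true, decide_eq_true_eq] at hr
        rcases hr with ⟨h1, h2⟩ | ⟨h1, h2⟩
        · have hp := ih (i - 1) (by omega) j hj (by omega) h2
          rcases hX (i - 1) (by omega) j hj hp with hmem | hexp
          · simp at hmem
          · have := hexp.1 (by omega)
            rw [show i - 1 + 1 = i by omega] at this
            rcases this with hc | hc
            · rw [hc] at hwl; exact absurd hwl (by simp)
            · exact hc
        · have hp := ih i hi (j - 1) (by omega) (by omega) h2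
          rcases hX i hi (j - 1) (by omega) hp with hmem | hexp
          · simp at hmem
          · have := hexp.2 (by omega)
            rw [show j - 1 + 1 = j by omega] at this
            rcases this with hc | hc
            · rw [hc] at hwl; exact absurd hwl (by simp)
            · exact hc
  intro i hi j hj
  unfold pvSpecV
  by_cases hr : pvReach (pvWall G) sy sx i j = true
  · rw [if_pos hr]
    rcases hD i hi j hj with hc | hc
    · exact absurd hc (key (i + j) i hi j hj le_rfl hr)
    · exact hc.1
  · rw [if_neg (by simpa using hr)]
    rcases hD i hi j hj with hc | hc
    · exact hc
    · exact absurd hc.2 hr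

lemma pvLoopA_done (G : List String) (h w sy sx : Nat) (hsy : sy < h) (hsx : sx < w)
    (hb : (h : Int) + w < pvINF) :
    ∀ fuel (q : List (Int × Int)) (d : List (List Int)), pvInv G h w sy sx q d →
      3 * pvCnt d + q.length < fuel →
      pvShape h w (pvLoopA G ↑h ↑w fuel q d) ∧
      ∀ i, i < h → ∀ j, j < w →
        pvGet2 (pvLoopA G ↑h ↑w fuel q d) ↑i ↑j = pvSpecV (pvWall G) sy sx i j := by
  intro fuel
  induction fuel with
  | zero => intro q d _ hm; omega
  | succ fuel ih =>
    intro q d hInv hm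
    cases q with
    | nil =>
      exact ⟨hInv.1, pvInv_done G h w sy sx hsy hsx d hInv⟩
    | cons p rest =>
      obtain ⟨py, px⟩ := p
      obtain ⟨hshape, hQ, hD, hS, hX⟩ := hInv
      obtain ⟨yi, xi, hpe, hyi, hxi, hval⟩ := hQ (py, px) (List.mem_cons_self ..)
      rw [Prod.mk.injEq] at hpe
      obtain ⟨hpy, hpx⟩ := hpe
      subst hpy; subst hpx
      have hmlen : 3 * pvCnt d + rest.length + 1 < fuel + 1 := by
        simpa using hm
      rw [pvLoopA]
      simp only [List.foldl_cons, List.foldl_nil]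
      have hreach_now : pvReach (pvWall G) sy sx yi xi = true := by
        rcases hD yi hyi xi hxi with hc | hc
        · rw [hval] at hc
          have := pvOff_lt sy sx yi xi h w hyi hxi hb
          omega
        · exact hc.2
      rcases pvStep_char G h w sy sx yi xi hyi hxi d hshape hval [] (yi + 1) xi ((0 : Int), (1 : Int))
          (Or.inl ⟨rfl, rfl, rfl⟩) with ⟨hP1, hst1⟩ | ⟨hP1, hst1⟩
      · -- down neighbour skipped
        rw [hst1]
        rcases pvStep_char G h w sy sx yi xi hyi hxi d hshape hval [] yi (xi + 1) ((1 : Int), (0 : Int))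
            (Or.inr ⟨rfl, rfl, rfl⟩) with ⟨hP2, hst2⟩ | ⟨hP2, hst2⟩
        · -- both skipped
          rw [hst2]
          dsimp only
          rw [List.append_nil]
          refine ih rest d ⟨hshape, ?_, hD, hS, ?_⟩ (by omega)
          · intro p hp
            exact hQ p (List.mem_cons_of_mem _ hp)
          · intro i hi j hj hne
            rcases hX i hi j hj hne with hmem | hexp
            · rcases List.mem_cons.mp hmem with hc | hc
              · rw [Prod.mk.injEq] at hc
                have hiy : i = yi := by exact_mod_cast hc.1
                have hjx : j = xi := by exact_mod_cast hc.2
                right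
                rw [hiy, hjx]
                constructor
                · intro hlt
                  by_cases hwl : pvWall G (yi + 1) xi = true
                  · exact Or.inl hwl
                  · refine Or.inr ?_
                    intro hinf
                    exact hP1 ⟨hlt, hxi, hinf, by simpa using hwl⟩
                · intro hlt
                  by_cases hwl : pvWall G yi (xi + 1) = true
                  · exact Or.inl hwl
                  · refine Or.inr ?_
                    intro hinf
                    exact hP2 ⟨hyi, hlt, hinf, by simpa using hwl⟩
              · exact Or.inl hc
            · exact Or.inr hexp
        · -- only right neighbour pushed
          rw [hst2]
          dsimp only
          obtain ⟨hn2h, hn2w, hn2INF, hn2wall⟩ := hP2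
          obtain ⟨hsh2, hchar2, hD2, hS2, hcnt2, hreach2⟩ :=
            pvWrite_facts G h w sy sx hb d hshape hD hS yi xi yi (xi + 1) hyi hxi hn2h hn2w
              hn2INF hn2wall (Or.inr ⟨rfl, rfl⟩) hval
          have hmono : ∀ y x : Nat, pvGet2 d ↑y ↑x ≠ pvINF →
              pvGet2 (pvSet2 d ↑yi ↑(xi + 1) (pvOff sy sx yi xi + 1)) ↑y ↑x ≠ pvINF := by
            intro y x hne
            rw [hchar2]
            by_cases hc : y = yi ∧ x = xi + 1
            · rw [if_pos hc]
              have := pvOff_lt sy sx yi (xi + 1) h w hyi hn2w hb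
              omega
            · rw [if_neg hc]; exact hne
          refine ih _ _ ⟨hsh2, ?_, hD2, hS2, ?_⟩ (by simp only [List.length_append, List.length_cons, List.length_nil, List.length_singleton]; omega)
          · intro p hp
            rcases List.mem_append.mp hp with hp | hp
            · obtain ⟨i, j, hpe, hi, hj, hv⟩ := hQ p (List.mem_cons_of_mem _ hp)
              refine ⟨i, j, hpe, hi, hj, ?_⟩
              rw [hchar2, if_neg ?_]
              · exact hv
              · rintro ⟨hie, hje⟩
                rw [hie, hje] at hv
                rw [hv] at hn2INF
                have := pvOff_lt sy sx yi (xi + 1) h w hyi hn2w hb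
                omega
            · rcases List.mem_singleton.mp hp with rfl
              refine ⟨yi, xi + 1, by push_cast; rfl, hyi, hn2w, ?_⟩
              rw [hchar2, if_pos ⟨rfl, rfl⟩]
          · intro i hi j hj hne
            by_cases hc : i = yi ∧ j = xi + 1
            · refine Or.inl (List.mem_append.mpr (Or.inr ?_))
              rw [hc.1, hc.2]
              simp
            · have hne' : pvGet2 d ↑i ↑j ≠ pvINF := by
                rw [hchar2, if_neg hc] at hne
                exact hne
              rcases hX i hi j hj hne' with hmem | hexp
              · rcases List.mem_cons.mp hmem with hc2 | hc2
                · rw [Prod.mk.injEq] at hc2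
                  have hiy : i = yi := by exact_mod_cast hc2.1
                  have hjx : j = xi := by exact_mod_cast hc2.2
                  right
                  rw [hiy, hjx]
                  constructor
                  · intro hlt
                    by_cases hwl : pvWall G (yi + 1) xi = true
                    · exact Or.inl hwl
                    · refine Or.inr ?_
                      intro hinf
                      apply hP1
                      refine ⟨hlt, hxi, ?_, by simpa using hwl⟩
                      rw [hchar2, if_neg (by rintro ⟨hcc, _⟩; omega)] at hinf
                      exact hinf
                  · intro _
                    refine Or.inr ?_
                    rw [hchar2, if_pos ⟨rfl, rfl⟩]
                    have := pvOff_lt sy sx yi (xi + 1) h w hyi hn2w hb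
                    omega
                · exact Or.inl (List.mem_append.mpr (Or.inl hc2))
              · exact Or.inr (pvExp_mono G h w d _ i j hmono hexp)
      · -- down neighbour pushed
        rw [hst1, List.nil_append]
        obtain ⟨hn1h, hn1w, hn1INF, hn1wall⟩ := hP1
        obtain ⟨hsh1, hchar1, hD1, hS1, hcnt1, hreach1⟩ :=
          pvWrite_facts G h w sy sx hb d hshape hD hS yi xi (yi + 1) xi hyi hxi hn1h hn1w
            hn1INF hn1wall (Or.inl ⟨rfl, rfl⟩) hval
        have hval1 : pvGet2 (pvSet2 d ↑(yi + 1) ↑xi (pvOff sy sx yi xi + 1)) ↑yi ↑xi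
            = pvOff sy sx yi xi := by
          rw [hchar1, if_neg (by rintro ⟨hcc, _⟩; omega)]
          exact hval
        have hmono1 : ∀ y x : Nat, pvGet2 d ↑y ↑x ≠ pvINF →
            pvGet2 (pvSet2 d ↑(yi + 1) ↑xi (pvOff sy sx yi xi + 1)) ↑y ↑x ≠ pvINF := by
          intro y x hne
          rw [hchar1]
          by_cases hc : y = yi + 1 ∧ x = xi
          · rw [if_pos hc]
            have := pvOff_lt sy sx (yi + 1) xi h w hn1h hxi hb
            omega
          · rw [if_neg hc]; exact hne
        rcases pvStep_char G h w sy sx yi xi hyi hxi _ hsh1 hval1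
            [(((yi + 1 : Nat) : Int), ((xi : Nat) : Int))] yi (xi + 1) ((1 : Int), (0 : Int))
            (Or.inr ⟨rfl, rfl, rfl⟩) with ⟨hP2, hst2⟩ | ⟨hP2, hst2⟩
        · -- only down pushed
          rw [hst2]
          dsimp only
          refine ih _ _ ⟨hsh1, ?_, hD1, hS1, ?_⟩ (by simp only [List.length_append, List.length_cons, List.length_nil, List.length_singleton]; omega)
          · intro p hp
            rcases List.mem_append.mp hp with hp | hp
            · obtain ⟨i, j, hpe, hi, hj, hv⟩ := hQ p (List.mem_cons_of_mem _ hp)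
              refine ⟨i, j, hpe, hi, hj, ?_⟩
              rw [hchar1, if_neg ?_]
              · exact hv
              · rintro ⟨hie, hje⟩
                rw [hie, hje] at hv
                rw [hv] at hn1INF
                have := pvOff_lt sy sx (yi + 1) xi h w hn1h hxi hb
                omega
            · rcases List.mem_singleton.mp hp with rfl
              refine ⟨yi + 1, xi, ?_, hn1h, hxi, ?_⟩
              · push_cast
                rfl
              · rw [hchar1, if_pos ⟨rfl, rfl⟩]
          · intro i hi j hj hne
            by_cases hc : i = yi + 1 ∧ j = xi
            · refine Or.inl (List.mem_append.mpr (Or.inr ?_))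
              rw [hc.1, hc.2]
              simp
            · have hne' : pvGet2 d ↑i ↑j ≠ pvINF := by
                rw [hchar1, if_neg hc] at hne
                exact hne
              rcases hX i hi j hj hne' with hmem | hexp
              · rcases List.mem_cons.mp hmem with hc2 | hc2
                · rw [Prod.mk.injEq] at hc2
                  have hiy : i = yi := by exact_mod_cast hc2.1
                  have hjx : j = xi := by exact_mod_cast hc2.2
                  right
                  rw [hiy, hjx]
                  constructor
                  · intro _
                    refine Or.inr ?_
                    rw [hchar1, if_pos ⟨rfl, rfl⟩]
                    have := pvOff_lt sy sx (yi + 1) xi h w hn1h hxi hb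
                    omega
                  · intro hlt
                    by_cases hwl : pvWall G yi (xi + 1) = true
                    · exact Or.inl hwl
                    · refine Or.inr ?_
                      intro hinf
                      exact hP2 ⟨hyi, hlt, hinf, by simpa using hwl⟩
                · exact Or.inl (List.mem_append.mpr (Or.inl hc2))
              · exact Or.inr (pvExp_mono G h w d _ i j hmono1 hexp)
        · -- both neighbours pushed
          rw [hst2]
          dsimp only
          obtain ⟨hn2h, hn2w, hn2INF, hn2wall⟩ := hP2
          obtain ⟨hsh2, hchar2, hD2, hS2, hcnt2, hreach2⟩ :=
            pvWrite_facts G h w sy sx hb _ hsh1 hD1 hS1 yi xi yi (xi + 1) hyi hxi hn2h hn2w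
              hn2INF hn2wall (Or.inr ⟨rfl, rfl⟩) hval1
          have hmono2 : ∀ y x : Nat,
              pvGet2 (pvSet2 d ↑(yi + 1) ↑xi (pvOff sy sx yi xi + 1)) ↑y ↑x ≠ pvINF →
              pvGet2 (pvSet2 (pvSet2 d ↑(yi + 1) ↑xi (pvOff sy sx yi xi + 1)) ↑yi ↑(xi + 1)
                (pvOff sy sx yi xi + 1)) ↑y ↑x ≠ pvINF := by
            intro y x hne
            rw [hchar2]
            by_cases hc : y = yi ∧ x = xi + 1
            · rw [if_pos hc]
              have := pvOff_lt sy sx yi (xi + 1) h w hyi hn2w hb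
              omega
            · rw [if_neg hc]; exact hne
          refine ih _ _ ⟨hsh2, ?_, hD2, hS2, ?_⟩ (by simp only [List.length_append, List.length_cons, List.length_nil, List.length_singleton]; omega)
          · intro p hp
            rcases List.mem_append.mp hp with hp | hp
            · obtain ⟨i, j, hpe, hi, hj, hv⟩ := hQ p (List.mem_cons_of_mem _ hp)
              refine ⟨i, j, hpe, hi, hj, ?_⟩
              have hoij := pvOff_lt sy sx i j h w hi hj hb
              have hv1 : pvGet2 (pvSet2 d ↑(yi + 1) ↑xi (pvOff sy sx yi xi + 1)) ↑i ↑j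
                  = pvOff sy sx i j := by
                rw [hchar1, if_neg ?_]
                · exact hv
                · rintro ⟨hie, hje⟩
                  rw [hie, hje] at hv
                  rw [hv] at hn1INF
                  have := pvOff_lt sy sx (yi + 1) xi h w hn1h hxi hb
                  omega
              rw [hchar2, if_neg ?_]
              · exact hv1
              · rintro ⟨hie, hje⟩
                rw [hie, hje] at hv1
                rw [hv1] at hn2INF
                have := pvOff_lt sy sx yi (xi + 1) h w hyi hn2w hb
                omega
            · rcases List.mem_cons.mp hp with rfl | hp
              · refine ⟨yi + 1, xi, ?_, hn1h, hxi, ?_⟩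
                · push_cast
                  rfl
                · rw [hchar2, if_neg (by rintro ⟨hcc, _⟩; omega), hchar1, if_pos ⟨rfl, rfl⟩]
              · rcases List.mem_singleton.mp hp with rfl
                refine ⟨yi, xi + 1, by push_cast; rfl, hyi, hn2w, ?_⟩
                rw [hchar2, if_pos ⟨rfl, rfl⟩]
          · intro i hi j hj hne
            by_cases hc2 : i = yi ∧ j = xi + 1
            · refine Or.inl (List.mem_append.mpr (Or.inr ?_))
              rw [hc2.1, hc2.2]
              simp
            · by_cases hc1 : i = yi + 1 ∧ j = xi
              · refine Or.inl (List.mem_append.mpr (Or.inr ?_))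
                rw [hc1.1, hc1.2]
                simp
              · have hne' : pvGet2 d ↑i ↑j ≠ pvINF := by
                  rw [hchar2, if_neg hc2, hchar1, if_neg hc1] at hne
                  exact hne
                rcases hX i hi j hj hne' with hmem | hexp
                · rcases List.mem_cons.mp hmem with hc3 | hc3
                  · rw [Prod.mk.injEq] at hc3
                    have hiy : i = yi := by exact_mod_cast hc3.1
                    have hjx : j = xi := by exact_mod_cast hc3.2
                    right
                    rw [hiy, hjx]
                    constructor
                    · intro _
                      refine Or.inr ?_
                      rw [hchar2, if_neg (by rintro ⟨hcc, _⟩; omega), hchar1, if_pos ⟨rfl, rfl⟩]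
                      have := pvOff_lt sy sx (yi + 1) xi h w hn1h hxi hb
                      omega
                    · intro _
                      refine Or.inr ?_
                      rw [hchar2, if_pos ⟨rfl, rfl⟩]
                      have := pvOff_lt sy sx yi (xi + 1) h w hyi hn2w hb
                      omega
                  · exact Or.inl (List.mem_append.mpr (Or.inl hc3))
                · exact Or.inr (pvExp_mono G h w _ _ i j hmono2
                    (pvExp_mono G h w d _ i j hmono1 hexp))

-- ======== whole-grid extensionality ========
lemma pvGrid_ext (h w : Nat) (d : List (List Int)) (hshape : pvShape h w d)
    (f : Nat → Nat → Int) (hpt : ∀ i, i < h → ∀ j, j < w → pvGet2 d ↑i ↑j = f i j) :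
    d = (List.range h).map (fun i => (List.range w).map (fun j => f i j)) := by
  obtain ⟨hlen, hrow⟩ := hshape
  apply List.ext_getElem
  · simp [hlen]
  intro i h1 h2
  have hi : i < h := by omega
  have hrl : d[i].length = w := hrow _ (List.getElem_mem h1)
  apply List.ext_getElem
  · simp [hrl]
  intro j hj1 hj2
  have hj : j < w := by omega
  have hpt' := hpt i hi j hj
  rw [pvGet2_nat] at hpt'
  rw [List.getElem?_eq_getElem h1] at hpt'
  simp only [Option.bind_some, List.getElem?_eq_getElem hj1, Option.getD_some] at hpt'
  simp [hpt', hi, hj]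

-- ======== the cells B has processed, in row-major order ========
def pvCells (w i j : Nat) : List (Nat × Nat) :=
  ((List.range i).flatMap (fun a => (List.range w).map (fun b => (a, b)))) ++
    (List.range j).map (fun b => (i, b))

lemma pvCells_mem (w i j a b : Nat) :
    (a, b) ∈ pvCells w i j ↔ ((a < i ∧ b < w) ∨ (a = i ∧ b < j)) := by
  simp only [pvCells, List.mem_append, List.mem_flatMap, List.mem_map, List.mem_range,
    Prod.mk.injEq]
  constructor
  · rintro (⟨a', ha', b', hb', h1, h2⟩ | ⟨b', hb', h1, h2⟩)
    · subst h1; subst h2; exact Or.inl ⟨ha', hb'⟩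
    · subst h1; subst h2; exact Or.inr ⟨rfl, hb'⟩
  · rintro (⟨h1, h2⟩ | ⟨h1, h2⟩)
    · exact Or.inl ⟨a, h1, b, h2, rfl, rfl⟩
    · exact Or.inr ⟨b, h2, h1.symm, rfl⟩

lemma pvCells_succ (w i j : Nat) : pvCells w i (j + 1) = pvCells w i j ++ [(i, j)] := by
  simp [pvCells, List.range_succ]

lemma pvCells_row (w i : Nat) : pvCells w (i + 1) 0 = pvCells w i w := by
  simp [pvCells, List.range_succ]

lemma pvCells_nodup (w : Nat) : ∀ i j, (pvCells w i j).Nodup := by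
  have hstep : ∀ i j, (pvCells w i j).Nodup → (pvCells w i (j + 1)).Nodup := by
    intro i j hn
    rw [pvCells_succ]
    apply List.Nodup.append hn (List.nodup_singleton _)
    intro p hp hp1
    rcases List.mem_singleton.mp hp1 with rfl
    rcases (pvCells_mem w i j i j).mp hp with ⟨h1, _⟩ | ⟨_, h2⟩
    · omega
    · omega
  have hall : ∀ i, ∀ j, (pvCells w i j).Nodup := by
    intro i
    induction i with
    | zero =>
      intro j
      induction j with
      | zero => simp [pvCells]
      | succ j ihj => exact hstep 0 j ihj
    | succ i ihi =>
      intro j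
      induction j with
      | zero => rw [pvCells_row]; exact ihi w
      | succ j ihj => exact hstep (i + 1) j ihj
  exact hall

-- ======== the ideal contents of B's dict after processing the prefix up to (i, j) ========
def pvEItems (G : List String) (sy sx w i j : Nat) : List ((Int × Int) × Int) :=
  (((sy : Int), (sx : Int)), 0) ::
    ((pvCells w i j).filter
        (fun p => !decide (p = (sy, sx)) && pvReach (pvWall G) sy sx p.1 p.2)).map
      (fun p => (((p.1 : Int), (p.2 : Int)), pvOff sy sx p.1 p.2))

lemma pvCast_inj (a b c d : Nat) :
    (((a : Int), (b : Int)) : Int × Int) = ((c : Int), (d : Int)) ↔ (a = c ∧ b = d) := by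
  simp [Prod.ext_iff]

lemma pvE_key_mem (G : List String) (sy sx w i j : Nat) (y x : Int) :
    (y, x) ∈ (pvEItems G sy sx w i j).map (·.1) ↔
      ((y, x) = (((sy : Int), (sx : Int)) : Int × Int) ∨
        ∃ a b : Nat, y = ↑a ∧ x = ↑b ∧ (a, b) ∈ pvCells w i j ∧ (a, b) ≠ (sy, sx) ∧
          pvReach (pvWall G) sy sx a b = true) := by
  simp only [pvEItems, List.map_cons, List.mem_cons, List.map_map, List.mem_map,
    Function.comp, List.mem_filter, Bool.and_eq_true, Bool.not_eq_eq_eq_not, Bool.not_true,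
    decide_eq_false_iff_not]
  constructor
  · rintro (h | ⟨⟨a, b⟩, ⟨hm, hne, hr⟩, he⟩)
    · exact Or.inl h
    · rw [Prod.mk.injEq] at he
      exact Or.inr ⟨a, b, he.1.symm, he.2.symm, hm, hne, hr⟩
  · rintro (h | ⟨a, b, rfl, rfl, hm, hne, hr⟩)
    · exact Or.inl h
    · exact Or.inr ⟨(a, b), ⟨hm, hne, hr⟩, rfl⟩

lemma pvE_entry_mem (G : List String) (sy sx w i j : Nat) (y x v : Int) :
    ((y, x), v) ∈ pvEItems G sy sx w i j ↔
      (((y, x) = (((sy : Int), (sx : Int)) : Int × Int) ∧ v = 0) ∨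
        ∃ a b : Nat, y = ↑a ∧ x = ↑b ∧ (a, b) ∈ pvCells w i j ∧ (a, b) ≠ (sy, sx) ∧
          pvReach (pvWall G) sy sx a b = true ∧ v = pvOff sy sx a b) := by
  simp only [pvEItems, List.mem_cons, List.mem_map, List.mem_filter, Bool.and_eq_true,
    Bool.not_eq_eq_eq_not, Bool.not_true, decide_eq_false_iff_not, Prod.mk.injEq]
  constructor
  · rintro (⟨h1, h2⟩ | ⟨⟨a, b⟩, ⟨hm, hne, hr⟩, he1, he2⟩)
    · exact Or.inl ⟨h1, h2⟩
    · rcases he1 with ⟨hy, hx⟩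
      exact Or.inr ⟨a, b, hy.symm, hx.symm, hm, hne, hr, he2.symm⟩
  · rintro (⟨h1, h2⟩ | ⟨a, b, rfl, rfl, hm, hne, hr, rfl⟩)
    · exact Or.inl ⟨h1, h2⟩
    · exact Or.inr ⟨(a, b), ⟨hm, hne, hr⟩, ⟨rfl, rfl⟩, rfl⟩

lemma pvE_nodup_keys (G : List String) (sy sx w i j : Nat) :
    ((pvEItems G sy sx w i j).map (·.1)).Nodup := by
  simp only [pvEItems, List.map_cons, List.map_map]
  refine List.nodup_cons.mpr ⟨?_, ?_⟩
  · intro hmem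
    rcases List.mem_map.mp hmem with ⟨⟨a, b⟩, hp, he⟩
    simp only [Function.comp] at he
    rcases (pvCast_inj sy sx a b).mp he.symm with ⟨h1, h2⟩
    rcases List.mem_filter.mp hp with ⟨-, hcond⟩
    simp only [Bool.and_eq_true, Bool.not_eq_eq_eq_not, Bool.not_true,
      decide_eq_false_iff_not] at hcond
    exact hcond.1 (by rw [← h1, ← h2])
  · refine List.Nodup.map ?_ (List.Nodup.filter _ (pvCells_nodup w i j))
    intro ⟨a, b⟩ ⟨c, d⟩ he
    simp only [Function.comp] at he
    rcases (pvCast_inj a b c d).mp he with ⟨h1, h2⟩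
    rw [h1, h2]

-- keys of the dict are its items' first components (definitional in PySem)
lemma pvDict_keys (dm : PySem.Dict (Int × Int) Int) : dm.keys = dm.items.map (·.1) := by
  simp [PySem.Dict.keys]

-- lookups against a dict whose items are pvEItems
lemma pvE_get?_cell (G : List String) (sy sx w i j : Nat)
    (dm : PySem.Dict (Int × Int) Int) (hit : dm.items = pvEItems G sy sx w i j)
    (a b : Nat) (hab : (a, b) ∈ pvCells w i j ∨ (a, b) = (sy, sx)) :
    dm.get? ((a : Int), (b : Int)) =
      if pvReach (pvWall G) sy sx a b then some (pvOff sy sx a b) else none := by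
  have hnod : dm.keys.Nodup := by rw [pvDict_keys, hit]; exact pvE_nodup_keys G sy sx w i j
  by_cases hst : (a, b) = (sy, sx)
  · rw [Prod.mk.injEq] at hst
    rw [hst.1, hst.2]
    rw [if_pos (pvReach_start _ _ _)]
    rw [pvOff_self]
    exact PySem.Dict.get?_of_mem_items dm (by rw [hit]; exact List.mem_cons_self ..) hnod
  · rcases hab with hab | hab
    · by_cases hr : pvReach (pvWall G) sy sx a b = true
      · rw [if_pos hr]
        refine PySem.Dict.get?_of_mem_items dm ?_ hnod
        rw [hit, pvE_entry_mem]
        exact Or.inr ⟨a, b, rfl, rfl, hab, hst, hr, rfl⟩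
      · rw [if_neg (by simpa using hr)]
        rw [PySem.Dict.get?_eq_none_iff_not_mem_keys, pvDict_keys, hit, pvE_key_mem]
        rintro (he | ⟨a', b', h1, h2, -, -, hr'⟩)
        · obtain ⟨h1, h2⟩ := (pvCast_inj a b sy sx).mp he
          exact hst (by rw [h1, h2])
        · have ha : a = a' := by exact_mod_cast h1
          have hb : b = b' := by exact_mod_cast h2
          subst ha; subst hb
          exact hr hr'
    · exact absurd hab hst

lemma pvE_get?_out (G : List String) (sy sx w i j : Nat)
    (dm : PySem.Dict (Int × Int) Int) (hit : dm.items = pvEItems G sy sx w i j)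
    (y x : Int)
    (hout : ∀ a b : Nat, y = ↑a → x = ↑b → ¬((a, b) ∈ pvCells w i j ∨ (a, b) = (sy, sx))) :
    dm.get? (y, x) = none := by
  rw [PySem.Dict.get?_eq_none_iff_not_mem_keys, pvDict_keys, hit, pvE_key_mem]
  rintro (he | ⟨a, b, h1, h2, hm, -, -⟩)
  · rw [Prod.mk.injEq] at he
    exact hout sy sx he.1 he.2 (Or.inr rfl)
  · exact hout a b h1 h2 (Or.inl hm)

lemma pvE_contains (G : List String) (sy sx w i j : Nat)
    (dm : PySem.Dict (Int × Int) Int) (hit : dm.items = pvEItems G sy sx w i j)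
    (a b : Nat) (hnotpref : (a, b) ∉ pvCells w i j) :
    dm.contains ((a : Int), (b : Int)) = decide ((a, b) = (sy, sx)) := by
  rw [PySem.Dict.contains_eq_isSome_get?]
  by_cases hst : (a, b) = (sy, sx)
  · have h1 : a = sy := congrArg Prod.fst hst
    have h2 : b = sx := congrArg Prod.snd hst
    subst h1; subst h2
    rw [pvE_get?_cell G a b w i j dm hit a b (Or.inr rfl), if_pos (pvReach_start _ _ _)]
    simp
  · have hg : dm.get? ((a : Int), (b : Int)) = none := by
      refine pvE_get?_out G sy sx w i j dm hit _ _ ?_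
      intro a' b' h1 h2
      have ha : a' = a := by exact_mod_cast h1.symm
      have hb : b' = b := by exact_mod_cast h2.symm
      subst ha; subst hb
      rintro (hm | he)
      · exact hnotpref hm
      · exact hst he
    rw [hg]
    simp [hst]

-- ======== one cell of B's sweep advances the ideal items by one ========
lemma pvDictStep (G : List String) (sy sx w : Nat) (i j : Nat) (hj : j < w)
    (dm : PySem.Dict (Int × Int) Int) (hit : dm.items = pvEItems G sy sx w i j) :
    (if dm.contains ((i : Int), (j : Int)) then dm
     else
       let cand := [((i : Int) - 1, (j : Int)), ((i : Int), (j : Int) - 1)].filterMap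
         (fun p => dm.get? p)
       match PySem.List.min? cand (fun v => v) with
       | none => dm
       | some m =>
           if pvChAt G ↑i ↑j = '#' then dm
           else dm.insert ((i : Int), (j : Int)) (m + 1)).items
      = pvEItems G sy sx w i (j + 1) := by
  have hnotpref : (i, j) ∉ pvCells w i j := by
    rw [pvCells_mem]; omega
  have hcont := pvE_contains G sy sx w i j dm hit i j hnotpref
  by_cases hst : (i, j) = (sy, sx)
  · -- the start cell: skipped, and the filter drops it too
    rw [if_pos (by rw [hcont]; simp [hst])]
    rw [hit]
    unfold pvEItems
    rw [pvCells_succ, List.filter_append]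
    have : List.filter (fun p => !decide (p = (sy, sx)) && pvReach (pvWall G) sy sx p.1 p.2)
        [(i, j)] = [] := by
      simp [hst]
    rw [this, List.append_nil]
  · rw [if_neg (by rw [hcont]; simp [hst])]
    have hst' : ¬(i = sy ∧ j = sx) := fun hc => hst (by rw [hc.1, hc.2])
    -- evaluate the two candidate lookups
    have hup : dm.get? ((i : Int) - 1, (j : Int)) =
        if 0 < i ∧ pvReach (pvWall G) sy sx (i - 1) j = true
        then some (pvOff sy sx i j - 1) else none := by
      by_cases hi0 : 0 < i
      · have hcast : ((i : Int) - 1) = ((i - 1 : Nat) : Int) := by omega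
        rw [hcast]
        rw [pvE_get?_cell G sy sx w i j dm hit (i - 1) j
          (Or.inl (by rw [pvCells_mem]; omega))]
        by_cases hr : pvReach (pvWall G) sy sx (i - 1) j = true
        · rw [if_pos hr, if_pos ⟨hi0, hr⟩]
          unfold pvOff
          congr 1
          omega
        · rw [if_neg (by simpa using hr), if_neg (by tauto)]
      · rw [if_neg (by tauto)]
        refine pvE_get?_out G sy sx w i j dm hit _ _ ?_
        intro a b h1 h2 _
        omega
    have hlf : dm.get? ((i : Int), (j : Int) - 1) =
        if 0 < j ∧ pvReach (pvWall G) sy sx i (j - 1) = true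
        then some (pvOff sy sx i j - 1) else none := by
      by_cases hj0 : 0 < j
      · have hcast : ((j : Int) - 1) = ((j - 1 : Nat) : Int) := by omega
        rw [hcast]
        rw [pvE_get?_cell G sy sx w i j dm hit i (j - 1)
          (Or.inl (by rw [pvCells_mem]; omega))]
        by_cases hr : pvReach (pvWall G) sy sx i (j - 1) = true
        · rw [if_pos hr, if_pos ⟨hj0, hr⟩]
          unfold pvOff
          congr 1
          omega
        · rw [if_neg (by simpa using hr), if_neg (by tauto)]
      · rw [if_neg (by tauto)]
        refine pvE_get?_out G sy sx w i j dm hit _ _ ?_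
        intro a b h1 h2 _
        omega
    -- the unchanged-items equation when the new cell is unreachable
    have hsame : pvReach (pvWall G) sy sx i j = false →
        dm.items = pvEItems G sy sx w i (j + 1) := by
      intro hr
      rw [hit]
      unfold pvEItems
      rw [pvCells_succ, List.filter_append]
      have : List.filter (fun p => !decide (p = (sy, sx)) && pvReach (pvWall G) sy sx p.1 p.2)
          [(i, j)] = [] := by
        simp [hr]
      rw [this, List.append_nil]
    -- the appended-items equation when it is reachable
    have happ : pvReach (pvWall G) sy sx i j = true →
        dm.items ++ [(((i : Int), (j : Int)), pvOff sy sx i j)]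
          = pvEItems G sy sx w i (j + 1) := by
      intro hr
      rw [hit]
      unfold pvEItems
      rw [pvCells_succ, List.filter_append]
      have : List.filter (fun p => !decide (p = (sy, sx)) && pvReach (pvWall G) sy sx p.1 p.2)
          [(i, j)] = [(i, j)] := by
        simp [hst, hr]
      rw [this]
      simp
    by_cases hu : 0 < i ∧ pvReach (pvWall G) sy sx (i - 1) j = true
    all_goals by_cases hl : 0 < j ∧ pvReach (pvWall G) sy sx i (j - 1) = true
    -- both predecessors reachable
    · have e1 : dm.get? ((i : Int) - 1, (j : Int)) = some (pvOff sy sx i j - 1) := by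
        rw [hup, if_pos hu]
      have e2 : dm.get? ((i : Int), (j : Int) - 1) = some (pvOff sy sx i j - 1) := by
        rw [hlf, if_pos hl]
      simp only [List.filterMap_cons, List.filterMap_nil, e1, e2, PySem.List.min?_id_cons,
        List.foldl_cons, List.foldl_nil, min_self]
      by_cases hcw : pvChAt G ↑i ↑j = '#'
      · rw [if_pos hcw]
        refine hsame (pvReach_of_wall _ _ _ _ _ hst' (by simp [pvWall, hcw]))
      · rw [if_neg hcw]
        have hr : pvReach (pvWall G) sy sx i j = true := by
          rw [pvReach_step _ _ _ _ _ hst' (by simp [pvWall, hcw])]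
          simp [hu.1, hu.2]
        rw [PySem.Dict.items_insert_of_not_contains dm (pvOff sy sx i j - 1 + 1)
          (by rw [hcont]; simp [hst])]
        rw [show pvOff sy sx i j - 1 + 1 = pvOff sy sx i j by ring]
        exact happ hr
    · have e1 : dm.get? ((i : Int) - 1, (j : Int)) = some (pvOff sy sx i j - 1) := by
        rw [hup, if_pos hu]
      have e2 : dm.get? ((i : Int), (j : Int) - 1) = none := by
        rw [hlf, if_neg hl]
      simp only [List.filterMap_cons, List.filterMap_nil, e1, e2, PySem.List.min?_id_cons,
        List.foldl_nil]
      by_cases hcw : pvChAt G ↑i ↑j = '#'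
      · rw [if_pos hcw]
        refine hsame (pvReach_of_wall _ _ _ _ _ hst' (by simp [pvWall, hcw]))
      · rw [if_neg hcw]
        have hr : pvReach (pvWall G) sy sx i j = true := by
          rw [pvReach_step _ _ _ _ _ hst' (by simp [pvWall, hcw])]
          simp [hu.1, hu.2]
        rw [PySem.Dict.items_insert_of_not_contains dm (pvOff sy sx i j - 1 + 1)
          (by rw [hcont]; simp [hst])]
        rw [show pvOff sy sx i j - 1 + 1 = pvOff sy sx i j by ring]
        exact happ hr
    · have e1 : dm.get? ((i : Int) - 1, (j : Int)) = none := by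
        rw [hup, if_neg hu]
      have e2 : dm.get? ((i : Int), (j : Int) - 1) = some (pvOff sy sx i j - 1) := by
        rw [hlf, if_pos hl]
      simp only [List.filterMap_cons, List.filterMap_nil, e1, e2, PySem.List.min?_id_cons,
        List.foldl_nil]
      by_cases hcw : pvChAt G ↑i ↑j = '#'
      · rw [if_pos hcw]
        refine hsame (pvReach_of_wall _ _ _ _ _ hst' (by simp [pvWall, hcw]))
      · rw [if_neg hcw]
        have hr : pvReach (pvWall G) sy sx i j = true := by
          rw [pvReach_step _ _ _ _ _ hst' (by simp [pvWall, hcw])]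
          simp [hl.1, hl.2]
        rw [PySem.Dict.items_insert_of_not_contains dm (pvOff sy sx i j - 1 + 1)
          (by rw [hcont]; simp [hst])]
        rw [show pvOff sy sx i j - 1 + 1 = pvOff sy sx i j by ring]
        exact happ hr
    · have e1 : dm.get? ((i : Int) - 1, (j : Int)) = none := by
        rw [hup, if_neg hu]
      have e2 : dm.get? ((i : Int), (j : Int) - 1) = none := by
        rw [hlf, if_neg hl]
      simp only [List.filterMap_cons, List.filterMap_nil, e1, e2]
      rw [show PySem.List.min? ([] : List Int) (fun v => v) = none from
        (PySem.List.min?_eq_none_iff ..).mpr rfl]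
      refine hsame ?_
      by_cases hcw : pvChAt G ↑i ↑j = '#'
      · exact pvReach_of_wall _ _ _ _ _ hst' (by simp [pvWall, hcw])
      · rw [pvReach_step _ _ _ _ _ hst' (by simp [pvWall, hcw])]
        simp only [Bool.or_eq_false_iff, Bool.and_eq_false_iff]
        constructor
        · by_cases h1 : 0 < i
          · right; simpa using fun hrr => hu ⟨h1, hrr⟩
          · left; simpa using h1
        · by_cases h1 : 0 < j
          · right; simpa using fun hrr => hl ⟨h1, hrr⟩
          · left; simpa using h1

-- ======== the whole sweep: the dict's items are exactly the ideal items ========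
lemma pvDictRow (G : List String) (sy sx w i : Nat) :
    ∀ n : Nat, n ≤ w → ∀ dm : PySem.Dict (Int × Int) Int,
      dm.items = pvEItems G sy sx w i 0 →
      ((PySem.List.pyRange 0 (n : Int) 1).foldl (fun dm j =>
        if dm.contains ((i : Int), j) then dm
        else
          let cand := [((i : Int) - 1, j), ((i : Int), j - 1)].filterMap (fun p => dm.get? p)
          match PySem.List.min? cand (fun v => v) with
          | none => dm
          | some m =>
              if pvChAt G ↑i j = '#' then dm
              else dm.insert ((i : Int), j) (m + 1)) dm).items
        = pvEItems G sy sx w i n := by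
  intro n
  induction n with
  | zero =>
    intro _ dm hit
    rw [show ((0 : Nat) : Int) = 0 by norm_num]
    rw [show PySem.List.pyRange 0 (0 : Int) 1 = ([] : List Int) from
      PySem.List.pyRange_one_eq_nil (by omega)]
    exact hit
  | succ n ih =>
    intro hn dm hit
    rw [show ((n + 1 : Nat) : Int) = (n : Int) + 1 by push_cast; ring]
    rw [PySem.List.pyRange_one_succ_right (by omega : (0 : Int) ≤ (n : Int))]
    rw [List.foldl_append]
    simp only [List.foldl_cons, List.foldl_nil]
    exact pvDictStep G sy sx w i n (by omega) _ (ih (by omega) dm hit)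

lemma pvDictAll (G : List String) (sy sx w : Nat) (hsx : sx < w) :
    ∀ m : Nat, ∀ dm : PySem.Dict (Int × Int) Int,
      dm.items = pvEItems G sy sx w 0 0 →
      ((PySem.List.pyRange 0 (m : Int) 1).foldl (fun dm i =>
        (PySem.List.pyRange 0 (w : Int) 1).foldl (fun dm j =>
          if dm.contains (i, j) then dm
          else
            let cand := [(i - 1, j), (i, j - 1)].filterMap (fun p => dm.get? p)
            match PySem.List.min? cand (fun v => v) with
            | none => dm
            | some m =>
                if pvChAt G i j = '#' then dm
                else dm.insert (i, j) (m + 1)) dm) dm).items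
        = pvEItems G sy sx w m 0 := by
  intro m
  induction m with
  | zero =>
    intro dm hit
    rw [show ((0 : Nat) : Int) = 0 by norm_num]
    rw [show PySem.List.pyRange 0 (0 : Int) 1 = ([] : List Int) from
      PySem.List.pyRange_one_eq_nil (by omega)]
    exact hit
  | succ n ih =>
    intro dm hit
    rw [show ((n + 1 : Nat) : Int) = (n : Int) + 1 by push_cast; ring]
    rw [PySem.List.pyRange_one_succ_right (by omega : (0 : Int) ≤ (n : Int))]
    rw [List.foldl_append]
    simp only [List.foldl_cons, List.foldl_nil]
    have hrow := pvDictRow G sy sx w n w le_rfl _ (ih dm hit)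
    rw [show pvEItems G sy sx w n w = pvEItems G sy sx w (n + 1) 0 by
      unfold pvEItems; rw [pvCells_row]] at hrow
    exact hrow

-- the seed dict {(startY, startX): 0}
lemma pvSeed_items (sY sX : Int) :
    (PySem.Dict.ofList [((sY, sX), (0 : Int))]).items = [((sY, sX), (0 : Int))] := by
  rfl

-- ======== scattering the dict's items into the INF grid ========
lemma pvScatter_shape (h w : Nat) (L : List ((Int × Int) × Int)) :
    ∀ dist : List (List Int), pvShape h w dist →
      pvShape h w (L.foldl (fun dist kv => pvSet2 dist kv.1.1 kv.1.2 kv.2) dist) := by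
  induction L with
  | nil => intro dist hsh; exact hsh
  | cons kv L ih =>
    intro dist hsh
    rw [List.foldl_cons]
    exact ih _ (pvSet2_shape h w dist hsh.1 hsh.2 _ _ _)

lemma pvScatter_not_mem (h w : Nat) (L : List ((Int × Int) × Int))
    (hkeys : ∀ kv ∈ L, ∃ a b : Nat, kv.1 = ((a : Int), (b : Int)) ∧ a < h ∧ b < w) :
    ∀ dist : List (List Int), pvShape h w dist →
      ∀ y x : Nat, ((y : Int), (x : Int)) ∉ L.map (·.1) →
        pvGet2 (L.foldl (fun dist kv => pvSet2 dist kv.1.1 kv.1.2 kv.2) dist) ↑y ↑x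
          = pvGet2 dist ↑y ↑x := by
  induction L with
  | nil => intro dist _ y x _; rfl
  | cons kv L ih =>
    intro dist hsh y x hnm
    obtain ⟨a, b, hk, ha, hb⟩ := hkeys kv (List.mem_cons_self ..)
    rw [List.foldl_cons]
    have hne : ¬(y = a ∧ x = b) := by
      rintro ⟨rfl, rfl⟩
      exact hnm (by rw [List.map_cons, hk]; exact List.mem_cons_self ..)
    rw [ih (fun p hp => hkeys p (List.mem_cons_of_mem _ hp)) _
      (pvSet2_shape h w dist hsh.1 hsh.2 _ _ _) y x
      (fun hc => hnm (List.mem_cons_of_mem _ hc))]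
    rw [hk]
    rw [pvGet2_pvSet2 h w dist hsh.1 hsh.2 ↑a ↑b a b ha hb
      (by rw [if_neg (by omega : ¬((a : Int) < 0))])
      (by rw [if_neg (by omega : ¬((b : Int) < 0))]) _ y x]
    rw [if_neg hne]

lemma pvScatter_mem (h w : Nat) (L : List ((Int × Int) × Int))
    (hkeys : ∀ kv ∈ L, ∃ a b : Nat, kv.1 = ((a : Int), (b : Int)) ∧ a < h ∧ b < w)
    (hnod : (L.map (·.1)).Nodup) :
    ∀ dist : List (List Int), pvShape h w dist →
      ∀ y x : Nat, ∀ v : Int, (((y : Int), (x : Int)), v) ∈ L →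
        pvGet2 (L.foldl (fun dist kv => pvSet2 dist kv.1.1 kv.1.2 kv.2) dist) ↑y ↑x = v := by
  induction L with
  | nil => intro dist _ y x v hv; simp at hv
  | cons kv L ih =>
    intro dist hsh y x v hv
    rw [List.foldl_cons]
    rcases List.mem_cons.mp hv with hv | hv
    · -- it is the head entry: write it, and no later entry touches the cell
      have hk : kv.1 = ((y : Int), (x : Int)) := by rw [← hv]
      obtain ⟨a, b, hk', ha, hb⟩ := hkeys kv (List.mem_cons_self ..)
      have hya : y = a ∧ x = b := by
        rw [hk'] at hk
        rw [Prod.mk.injEq] at hk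
        constructor
        · exact_mod_cast hk.1.symm
        · exact_mod_cast hk.2.symm
      have hnm : ((y : Int), (x : Int)) ∉ L.map (·.1) := by
        intro hc
        rw [List.map_cons, List.nodup_cons] at hnod
        exact hnod.1 (hk ▸ hc)
      rw [pvScatter_not_mem h w L (fun p hp => hkeys p (List.mem_cons_of_mem _ hp)) _
        (pvSet2_shape h w dist hsh.1 hsh.2 _ _ _) y x hnm]
      rw [hk']
      rw [pvGet2_pvSet2 h w dist hsh.1 hsh.2 ↑a ↑b a b ha hb
        (by rw [if_neg (by omega : ¬((a : Int) < 0))])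
        (by rw [if_neg (by omega : ¬((b : Int) < 0))]) _ y x]
      rw [if_pos hya]
      rw [← hv]
    · exact ih (fun p hp => hkeys p (List.mem_cons_of_mem _ hp))
        (by rw [List.map_cons, List.nodup_cons] at hnod; exact hnod.2) _
        (pvSet2_shape h w dist hsh.1 hsh.2 _ _ _) y x v hv

-- ======== B evaluates to the spec grid ========
lemma pvAlt_eval (G : List String) (h w sy sx : Nat) (hsy : sy < h) (hsx : sx < w) :
    bfs_alt G ↑h ↑w ↑sy ↑sx
      = (List.range h).map (fun i => (List.range w).map (fun j => pvSpecV (pvWall G) sy sx i j)) := by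
  have hseed : (PySem.Dict.ofList [((((sy : Int), (sx : Int)) : Int × Int), (0 : Int))]).items
      = pvEItems G sy sx w 0 0 := by
    rw [pvSeed_items]
    simp [pvEItems, pvCells]
  have hitems := pvDictAll G sy sx w hsx h _ hseed
  have hkeys : ∀ kv ∈ pvEItems G sy sx w h 0,
      ∃ a b : Nat, kv.1 = ((a : Int), (b : Int)) ∧ a < h ∧ b < w := by
    intro ⟨⟨y, x⟩, v⟩ hkv
    rcases (pvE_entry_mem G sy sx w h 0 y x v).mp hkv with ⟨he, -⟩ | ⟨a, b, rfl, rfl, hm, -, -, -⟩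
    · rw [Prod.mk.injEq] at he
      exact ⟨sy, sx, by simp [he.1, he.2], hsy, hsx⟩
    · rcases (pvCells_mem w h 0 a b).mp hm with ⟨ha, hb⟩ | ⟨-, hb⟩
      · exact ⟨a, b, rfl, ha, hb⟩
      · omega
  have hnod : ((pvEItems G sy sx w h 0).map (·.1)).Nodup := pvE_nodup_keys G sy sx w h 0
  have hsh0 : pvShape h w (List.replicate h (List.replicate w pvINF)) := by
    refine ⟨by simp, ?_⟩
    intro r hr
    rw [List.eq_of_mem_replicate hr]
    simp
  have hgrid : (pvEItems G sy sx w h 0).foldl (fun dist kv => pvSet2 dist kv.1.1 kv.1.2 kv.2)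
      (List.replicate h (List.replicate w pvINF))
      = (List.range h).map (fun i => (List.range w).map (fun j => pvSpecV (pvWall G) sy sx i j)) := by
    refine pvGrid_ext h w _ (pvScatter_shape h w _ _ hsh0) _ ?_
    intro i hi j hj
    by_cases hr : pvReach (pvWall G) sy sx i j = true
    · have hmem : (((i : Int), (j : Int)), pvOff sy sx i j) ∈ pvEItems G sy sx w h 0 := by
        rw [pvE_entry_mem]
        by_cases hst : (i, j) = (sy, sx)
        · rw [Prod.mk.injEq] at hst
          refine Or.inl ⟨by simp [hst.1, hst.2], ?_⟩
          rw [hst.1, hst.2, pvOff_self]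
        · exact Or.inr ⟨i, j, rfl, rfl, (pvCells_mem w h 0 i j).mpr (Or.inl ⟨hi, hj⟩), hst, hr, rfl⟩
      rw [pvScatter_mem h w _ hkeys hnod _ hsh0 i j _ hmem]
      unfold pvSpecV
      rw [if_pos hr]
    · have hnm : ((i : Int), (j : Int)) ∉ (pvEItems G sy sx w h 0).map (·.1) := by
        rw [pvE_key_mem]
        rintro (he | ⟨a, b, h1, h2, -, -, hr'⟩)
        · rw [Prod.mk.injEq] at he
          have h1 : i = sy := by exact_mod_cast he.1
          have h2 : j = sx := by exact_mod_cast he.2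
          rw [h1, h2] at hr
          exact hr (pvReach_start _ _ _)
        · have ha : i = a := by exact_mod_cast h1
          have hb : j = b := by exact_mod_cast h2
          rw [← ha, ← hb] at hr'
          exact hr hr'
      rw [pvScatter_not_mem h w _ hkeys _ hsh0 i j hnm]
      rw [pvGet2_replicate]
      unfold pvSpecV
      rw [if_neg (by simpa using hr)]
  exact (congrArg (fun l : List ((Int × Int) × Int) =>
    l.foldl (fun dist kv => pvSet2 dist kv.1.1 kv.1.2 kv.2)
      (List.replicate h (List.replicate w pvINF))) hitems).trans hgrid

-- ======== the initial state satisfies A's invariant, and the main nonnegative-start equality ========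
lemma pvInit_inv (G : List String) (h w sy sx : Nat) (hsy : sy < h) (hsx : sx < w) :
    pvInv G h w sy sx [((sy : Int), (sx : Int))]
      (pvSet2 (List.replicate h (List.replicate w pvINF)) ↑sy ↑sx 0) := by
  have hlen : (List.replicate h (List.replicate w pvINF)).length = h := by simp
  have hrow : ∀ r ∈ List.replicate h (List.replicate w pvINF), r.length = w := by
    intro r hr
    rw [List.eq_of_mem_replicate hr]
    simp
  have hchar : ∀ y x : Nat,
      pvGet2 (pvSet2 (List.replicate h (List.replicate w pvINF)) ↑sy ↑sx 0) ↑y ↑x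
        = if y = sy ∧ x = sx then 0 else pvINF := by
    intro y x
    rw [pvGet2_pvSet2 h w _ hlen hrow ↑sy ↑sx sy sx hsy hsx
      (by rw [if_neg (by omega : ¬((sy : Int) < 0))])
      (by rw [if_neg (by omega : ¬((sx : Int) < 0))]) 0 y x]
    by_cases hc : y = sy ∧ x = sx
    · rw [if_pos hc, if_pos hc]
    · rw [if_neg hc, if_neg hc, pvGet2_replicate]
  refine ⟨pvSet2_shape h w _ hlen hrow _ _ _, ?_, ?_, ?_, ?_⟩
  · intro p hp
    rcases List.mem_singleton.mp hp with rfl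
    refine ⟨sy, sx, rfl, hsy, hsx, ?_⟩
    rw [hchar, if_pos ⟨rfl, rfl⟩, pvOff_self]
  · intro i hi j hj
    rw [hchar]
    by_cases hc : i = sy ∧ j = sx
    · rw [if_pos hc, hc.1, hc.2]
      exact Or.inr ⟨(pvOff_self sy sx).symm, pvReach_start _ _ _⟩
    · rw [if_neg hc]
      exact Or.inl rfl
  · rw [hchar, if_pos ⟨rfl, rfl⟩]
  · intro i hi j hj hne
    rw [hchar] at hne
    by_cases hc : i = sy ∧ j = sx
    · refine Or.inl ?_
      rw [hc.1, hc.2]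
      simp
    · rw [if_neg hc] at hne
      exact absurd rfl hne

lemma pvMain (G : List String) (h w sy sx : Nat) (hsy : sy < h) (hsx : sx < w)
    (hb : (h : Int) + w < pvINF) :
    bfs G ↑h ↑w ↑sy ↑sx = bfs_alt G ↑h ↑w ↑sy ↑sx := by
  rw [pvAlt_eval G h w sy sx hsy hsx]
  unfold bfs
  simp only [Int.toNat_natCast]
  have hlen : (List.replicate h (List.replicate w pvINF)).length = h := by simp
  have hrow : ∀ r ∈ List.replicate h (List.replicate w pvINF), r.length = w := by
    intro r hr
    rw [List.eq_of_mem_replicate hr]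
    simp
  have hInv := pvInit_inv G h w sy sx hsy hsx
  have hsh1 := pvSet2_shape h w _ hlen hrow ((sy : Int)) ((sx : Int)) 0
  have hcnt : pvCnt (pvSet2 (List.replicate h (List.replicate w pvINF)) ↑sy ↑sx 0) ≤ h * w :=
    pvCnt_le h w _ hsh1.1 hsh1.2
  obtain ⟨hsh, hpt⟩ := pvLoopA_done G h w sy sx hsy hsx hb (3 * (h * w) + 2)
    [((sy : Int), (sx : Int))] _ hInv (by simp only [List.length_singleton]; omega)
  exact pvGrid_ext h w _ hsh _ hpt

-- ======== an inert start: a negative coordinate from which neither program expands ========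
-- (A's two neighbour probes both fail their bounds test, and B's dict seed is never a
-- predecessor of any swept cell, so both results are the seeded grid.)
lemma pvLoopA_inert (G : List String) (H W sY sX : Int)
    (hin : sY ≤ -2 ∨ sX ≤ -2 ∨ (sY = -1 ∧ sX = -1)) (k : Nat) (d : List (List Int)) :
    pvLoopA G H W (k + 1 + 1) [(sY, sX)] d = d := by
  rw [pvLoopA]
  simp only [List.foldl_cons, List.foldl_nil]
  have h1 : pvStep G H W sY sX ([], d) (0, 1) = ([], d) := by
    unfold pvStep
    dsimp only
    rw [if_pos ?_]
    rcases hin with h | h | ⟨h1, h2⟩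
    · exact Or.inl (by omega)
    · exact Or.inr (Or.inl (by omega))
    · exact Or.inr (Or.inl (by omega))
  have h2 : pvStep G H W sY sX ([], d) (1, 0) = ([], d) := by
    unfold pvStep
    dsimp only
    rw [if_pos ?_]
    rcases hin with h | h | ⟨h1, h2⟩
    · exact Or.inl (by omega)
    · exact Or.inr (Or.inl (by omega))
    · exact Or.inl (by omega)
  rw [h1, h2]
  dsimp only
  rw [List.append_nil]
  rw [pvLoopA]

lemma bfs_inert (G : List String) (H W sY sX : Int)
    (hin : sY ≤ -2 ∨ sX ≤ -2 ∨ (sY = -1 ∧ sX = -1)) :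
    bfs G H W sY sX
      = pvSet2 (List.replicate H.toNat (List.replicate W.toNat pvINF)) sY sX 0 := by
  unfold bfs
  exact pvLoopA_inert G H W sY sX hin (3 * (H.toNat * W.toNat)) _

lemma pvAltCell_inert (G : List String) (sY sX : Int)
    (hin : sY ≤ -2 ∨ sX ≤ -2 ∨ (sY = -1 ∧ sX = -1)) (i j : Int) (hi : 0 ≤ i) (hj : 0 ≤ j)
    (dm : PySem.Dict (Int × Int) Int) (hit : dm.items = [((sY, sX), (0 : Int))]) :
    (if dm.contains (i, j) then dm
     else
       let cand := [(i - 1, j), (i, j - 1)].filterMap (fun p => dm.get? p)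
       match PySem.List.min? cand (fun v => v) with
       | none => dm
       | some m => if pvChAt G i j = '#' then dm else dm.insert (i, j) (m + 1)) = dm := by
  have hkeys : dm.keys = [(sY, sX)] := by rw [pvDict_keys, hit]; rfl
  have hget : ∀ y x : Int, ¬(y = sY ∧ x = sX) → dm.get? (y, x) = none := by
    intro y x hne
    rw [PySem.Dict.get?_eq_none_iff_not_mem_keys, hkeys]
    intro hc
    rcases List.mem_singleton.mp hc with he
    rw [Prod.mk.injEq] at he
    exact hne he
  have hcont : dm.contains (i, j) = false := by
    rw [PySem.Dict.contains_eq_isSome_get?, hget i j ?_]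
    · rfl
    · rintro ⟨rfl, rfl⟩
      rcases hin with h | h | ⟨h1, h2⟩ <;> omega
  rw [if_neg (by rw [hcont]; exact Bool.false_ne_true)]
  have hup : dm.get? (i - 1, j) = none := by
    refine hget _ _ ?_
    rintro ⟨h1, h2⟩
    rcases hin with h | h | ⟨h3, h4⟩ <;> omega
  have hlf : dm.get? (i, j - 1) = none := by
    refine hget _ _ ?_
    rintro ⟨h1, h2⟩
    rcases hin with h | h | ⟨h3, h4⟩ <;> omega
  simp only [List.filterMap_cons, List.filterMap_nil, hup, hlf]
  rw [show PySem.List.min? ([] : List Int) (fun v => v) = none from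
    (PySem.List.min?_eq_none_iff ..).mpr rfl]

lemma pvAlt_inert (G : List String) (H W sY sX : Int)
    (hin : sY ≤ -2 ∨ sX ≤ -2 ∨ (sY = -1 ∧ sX = -1)) :
    bfs_alt G H W sY sX
      = pvSet2 (List.replicate H.toNat (List.replicate W.toNat pvINF)) sY sX 0 := by
  unfold bfs_alt
  have hrow : ∀ l : List Int, (∀ m ∈ l, 0 ≤ m) → ∀ i : Int, 0 ≤ i →
      ∀ dm : PySem.Dict (Int × Int) Int, dm.items = [((sY, sX), (0 : Int))] →
      l.foldl (fun dm j =>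
        if dm.contains (i, j) then dm
        else
          let cand := [(i - 1, j), (i, j - 1)].filterMap (fun p => dm.get? p)
          match PySem.List.min? cand (fun v => v) with
          | none => dm
          | some m => if pvChAt G i j = '#' then dm else dm.insert (i, j) (m + 1)) dm = dm := by
    intro l
    induction l with
    | nil => intro _ i _ dm _; rfl
    | cons j t ih =>
      intro hnn i hi dm hit
      rw [List.foldl_cons, pvAltCell_inert G sY sX hin i j hi (hnn j (List.mem_cons_self ..)) dm hit]
      exact ih (fun m hm => hnn m (List.mem_cons_of_mem _ hm)) i hi dm hit
  have houter : ∀ l : List Int, (∀ m ∈ l, 0 ≤ m) →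
      ∀ dm : PySem.Dict (Int × Int) Int, dm.items = [((sY, sX), (0 : Int))] →
      l.foldl (fun dm i =>
        (PySem.List.pyRange 0 W 1).foldl (fun dm j =>
          if dm.contains (i, j) then dm
          else
            let cand := [(i - 1, j), (i, j - 1)].filterMap (fun p => dm.get? p)
            match PySem.List.min? cand (fun v => v) with
            | none => dm
            | some m => if pvChAt G i j = '#' then dm else dm.insert (i, j) (m + 1)) dm) dm = dm := by
    intro l
    induction l with
    | nil => intro _ dm _; rfl
    | cons i t ih =>
      intro hnn dm hit
      rw [List.foldl_cons]
      rw [hrow (PySem.List.pyRange 0 W 1)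
        (fun m hm => ((PySem.List.mem_pyRange_one ..).mp hm).1) i
        (hnn i (List.mem_cons_self ..)) dm hit]
      exact ih (fun m hm => hnn m (List.mem_cons_of_mem _ hm)) dm hit
  have hconst := houter (PySem.List.pyRange 0 H 1)
    (fun m hm => ((PySem.List.mem_pyRange_one ..).mp hm).1)
    (PySem.Dict.ofList [((sY, sX), (0 : Int))]) (pvSeed_items sY sX)
  have hfin : (PySem.Dict.ofList [((sY, sX), (0 : Int))]).items.foldl
      (fun dist kv => pvSet2 dist kv.1.1 kv.1.2 kv.2)
      (List.replicate H.toNat (List.replicate W.toNat pvINF))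
      = pvSet2 (List.replicate H.toNat (List.replicate W.toNat pvINF)) sY sX 0 := by
    rw [pvSeed_items]
    rfl
  exact (congrArg (fun dm : PySem.Dict (Int × Int) Int =>
    dm.items.foldl (fun dist kv => pvSet2 dist kv.1.1 kv.1.2 kv.2)
      (List.replicate H.toNat (List.replicate W.toNat pvINF))) hconst).trans hfin

-- ===== VERDICT (by name: the statement is the Claim_ definition above) =====
theorem bfs_spec : Claim_equal_bfs := by
  intro G H W sY sX hDom hPre
  obtain ⟨hw1, hw2, hw3, hw4, hdisj⟩ := hPre
  show bfs G H W sY sX = bfs_alt G H W sY sX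
  by_cases hnn : 0 ≤ sY ∧ 0 ≤ sX
  · simp only [Dom_bfs, Bool.and_eq_true, pvDomInt, decide_eq_true_eq] at hDom
    obtain ⟨⟨⟨⟨-, hH⟩, hW⟩, -⟩, -⟩ := hDom
    have eH : H = ((H.toNat : Nat) : Int) := by omega
    have eW : W = ((W.toNat : Nat) : Int) := by omega
    have eY : sY = ((sY.toNat : Nat) : Int) := by omega
    have eX : sX = ((sX.toNat : Nat) : Int) := by omega
    rw [eH, eW, eY, eX]
    refine pvMain G H.toNat W.toNat sY.toNat sX.toNat (by omega) (by omega) ?_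
    have : pvINF = 10000000000000000 := by norm_num [pvINF]
    omega
  · have hin : sY ≤ -2 ∨ sX ≤ -2 ∨ (sY = -1 ∧ sX = -1) := by
      rcases hdisj with ⟨h1, h2, -⟩ | h | h | h
      · exact absurd ⟨h1, h2⟩ hnn
      · exact Or.inl h
      · exact Or.inr (Or.inl h)
      · exact Or.inr (Or.inr h)
    rw [bfs_inert G H W sY sX hin, pvAlt_inert G H W sY sX hin]
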